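-- pv_equiv track=rewrite | github.com/hidet-org/hidet | python/hidet/graph/impl/dlpack.py | is_compact_tensor
-- ===== SOURCE A (Python) =====
-- from typing import List, Callable, Set, Tuple
--
-- def is_compact_tensor(shape: List[int], strides: List[int]) -> bool:
--     assert len(shape) == len(strides)
--     current_stride = 1
--     for extent, stride in zip(reversed(shape), reversed(strides)):
--         if stride != current_stride and extent != 1:
--             return False
--         current_stride *= extent
--     return True
-- ===== SOURCE B (Python) =====
-- def is_compact_tensor(shape, strides):
--     assert len(shape) == len(strides)
--
--     # Divide and conquer on the dimension range [lo, hi): given that the product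
--     # of all extents to the right of hi is `base`, return (dims lo..hi-1 compact,
--     # product of shape[lo:hi]).  A dim is compact when its stride equals the total
--     # size of everything to its right, or its extent is 1.
--     def rec(lo, hi, base):
--         if lo == hi:
--             return (True, 1)
--         if hi - lo == 1:
--             return (strides[lo] == base or shape[lo] == 1, shape[lo])
--         mid = (lo + hi) // 2
--         ok_r, p_r = rec(mid, hi, base)
--         ok_l, p_l = rec(lo, mid, base * p_r)
--         return (ok_l and ok_r, p_l * p_r)
--
--     return rec(0, len(shape), 1)[0]
-- ===== Notes on version B (the rewrite author's own statement) =====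
-- stated objective: alternative
-- what changed: A scans the reversed lists iteratively with a running-stride accumulator and an early return; B is a divide-and-conquer recursion over index ranges that returns (compact?, extent product) per half and combines halves, passing the right half's product as the left half's stride base.
import Mathlib
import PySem

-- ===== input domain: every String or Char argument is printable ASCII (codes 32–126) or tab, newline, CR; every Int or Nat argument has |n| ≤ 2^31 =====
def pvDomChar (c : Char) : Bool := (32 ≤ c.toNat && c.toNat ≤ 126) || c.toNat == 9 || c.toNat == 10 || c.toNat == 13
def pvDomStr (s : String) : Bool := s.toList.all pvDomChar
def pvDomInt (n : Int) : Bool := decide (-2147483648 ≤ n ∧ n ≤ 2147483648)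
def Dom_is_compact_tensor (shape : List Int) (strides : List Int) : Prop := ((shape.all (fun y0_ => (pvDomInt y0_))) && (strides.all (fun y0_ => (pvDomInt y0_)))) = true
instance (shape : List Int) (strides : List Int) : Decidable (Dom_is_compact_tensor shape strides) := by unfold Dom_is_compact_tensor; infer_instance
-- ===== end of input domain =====

-- B replaces A's reversed loop (running-stride accumulator, early return) by a divide-and-conquer
-- recursion over index ranges combining (compact?, extent product) of the two halves.

-- ===== PORT A =====
-- A's loop over zip(reversed(shape), reversed(strides)), carrying current_stride, with early return.
def isCompactGoA : List (Int × Int) → Int → Bool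
  | [], _ => true
  | (extent, stride) :: rest, cur =>
    if stride ≠ cur ∧ extent ≠ 1 then false
    else isCompactGoA rest (cur * extent)

def is_compact_tensor (shape : List Int) (strides : List Int) : Bool :=
  isCompactGoA (shape.reverse.zip strides.reverse) 1

-- ===== PORT B =====
-- Source B's rec(lo, hi, base); the structural `fuel` argument only totalizes the recursion
-- (always called with fuel ≥ hi - lo, which halving preserves), and the `hi - lo = 0` guard is
-- Python's `lo == hi` on every reachable call (lo ≤ hi always); `.getD 0` totalizes the
-- in-range indexings strides[lo], shape[lo].
def isCompactRecB (shape strides : List Int) : Nat → Nat → Nat → Int → Bool × Int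
  | 0, _, _, _ => (true, 1)
  | fuel + 1, lo, hi, base =>
    if hi - lo = 0 then (true, 1)
    else if hi - lo = 1 then
      (((PySem.List.pyGet? strides (lo : Int)).getD 0 == base
          || (PySem.List.pyGet? shape (lo : Int)).getD 0 == 1),
        (PySem.List.pyGet? shape (lo : Int)).getD 0)
    else
      let mid := (lo + hi) / 2
      let r := isCompactRecB shape strides fuel mid hi base
      let l := isCompactRecB shape strides fuel lo mid (base * r.2)
      (l.1 && r.1, l.2 * r.2)

def is_compact_tensor_alt (shape : List Int) (strides : List Int) : Bool :=
  (isCompactRecB shape strides shape.length 0 shape.length 1).1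

-- ===== PRECONDITION & SPEC =====
-- A asserts len(shape) == len(strides); Pre_ excludes exactly the AssertionError inputs.
def Pre_is_compact_tensor (shape : List Int) (strides : List Int) : Prop :=
  shape.length = strides.length
instance (shape : List Int) (strides : List Int) : Decidable (Pre_is_compact_tensor shape strides) := by unfold Pre_is_compact_tensor; infer_instance

def pvWitness_is_compact_tensor : List Int × List Int := ([2, 3], [3, 1])

def Spec_is_compact_tensor (shape : List Int) (strides : List Int) (out : Bool) : Prop := out = is_compact_tensor_alt shape strides
instance (shape : List Int) (strides : List Int) (out : Bool) : Decidable (Spec_is_compact_tensor shape strides out) := by unfold Spec_is_compact_tensor; infer_instance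

-- ===== CLAIM (what is proved, stated in full; the proofs are below) =====
def Claim_equal_is_compact_tensor : Prop := ∀ (shape : List Int) (strides : List Int), Dom_is_compact_tensor shape strides → Pre_is_compact_tensor shape strides → Spec_is_compact_tensor shape strides (is_compact_tensor shape strides)

-- ===== LEMMAS AND PROOFS =====

-- Common normal form: each stride equals base times the product of the extents to its right
-- (within the segment), or the extent is 1.
def chk : List Int → List Int → Int → Bool
  | e :: es, s :: ss, base => chk es ss base && (s == base * es.prod || e == 1)
  | _, _, _ => true

-- Peeling the last pair off A's loop.
theorem goA_append (l : List (Int × Int)) (e s cur : Int) :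
    isCompactGoA (l ++ [(e, s)]) cur
      = (isCompactGoA l cur && (s == cur * (l.map Prod.fst).prod || e == 1)) := by
  induction l generalizing cur with
  | nil =>
    simp only [List.nil_append, isCompactGoA, List.map_nil, List.prod_nil, mul_one]
    by_cases h : s ≠ cur ∧ e ≠ 1
    · simp [h.1, h.2]
    · rcases Decidable.not_and_iff_or_not.mp h with h1 | h1 <;> simp at h1 <;> simp [h1]
  | cons p l ih =>
    obtain ⟨e', s'⟩ := p
    simp only [List.cons_append, isCompactGoA]
    by_cases h : s' ≠ cur ∧ e' ≠ 1
    · simp [h]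
    · simp only [if_neg h, ih (cur * e'), List.map_cons, List.prod_cons]
      ring_nf

-- A's reversed loop equals the normal form with base 1.
theorem goA_eq_chk (es ss : List Int) (h : es.length = ss.length) :
    isCompactGoA (es.reverse.zip ss.reverse) 1 = chk es ss 1 := by
  induction es generalizing ss with
  | nil => cases ss with
    | nil => simp [isCompactGoA, chk]
    | cons s ss' => simp at h
  | cons e es' ih =>
    cases ss with
    | nil => simp at h
    | cons s ss' =>
      simp only [List.length_cons, Nat.add_right_cancel_iff] at h
      have hz : (e :: es').reverse.zip (s :: ss').reverse
          = es'.reverse.zip ss'.reverse ++ [(e, s)] := by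
        simp only [List.reverse_cons]
        rw [List.zip_append (by simp [h])]
        simp
      have hmap : ((es'.reverse.zip ss'.reverse).map Prod.fst) = es'.reverse := by
        apply List.map_fst_zip
        simp [h]
      rw [hz, goA_append, ih ss' h, hmap, chk]
      simp

-- Splitting the normal form at an interior point: the left part's base gains the right part's product.
theorem chk_append (u v x y : List Int) (base : Int) (h : u.length = x.length) :
    chk (u ++ v) (x ++ y) base = (chk u x (base * v.prod) && chk v y base) := by
  induction u generalizing x with
  | nil => cases x with
    | nil => simp [chk]
    | cons a b => simp at h
  | cons e u' ih =>
    cases x with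
    | nil => simp at h
    | cons s x' =>
      simp only [List.length_cons, Nat.add_right_cancel_iff] at h
      simp only [List.cons_append, chk, ih x' h, List.prod_append]
      have : base * v.prod * u'.prod = base * (u'.prod * v.prod) := by ring
      rw [this]
      simp [Bool.and_assoc, Bool.and_comm]

-- B's divide-and-conquer computes the normal form of the segment and its extent product.
theorem recB_eq_chk (shape strides : List Int) (fuel lo hi : Nat) (base : Int) :
    hi - lo ≤ fuel → lo ≤ hi → hi ≤ shape.length → hi ≤ strides.length →
    isCompactRecB shape strides fuel lo hi base
      = (chk ((shape.drop lo).take (hi - lo)) ((strides.drop lo).take (hi - lo)) base,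
         ((shape.drop lo).take (hi - lo)).prod) := by
  induction fuel generalizing lo hi base with
  | zero =>
    intro hf hlo h1 h2
    have : hi = lo := by omega
    simp [this, isCompactRecB, chk]
  | succ fuel ih =>
    intro hf hlo h1 h2
    rw [isCompactRecB]
    by_cases h0 : hi - lo = 0
    · have : hi = lo := by omega
      simp [this, chk]
    · rw [if_neg h0]
      by_cases hone : hi - lo = 1
      · rw [if_pos hone]
        have hlt : lo < shape.length := by omega
        have hlt2 : lo < strides.length := by omega
        have hseg : (shape.drop lo).take (hi - lo) = [shape[lo]] := by
          rw [hone, List.take_one, List.head?_drop]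
          simp [hlt]
        have hseg2 : (strides.drop lo).take (hi - lo) = [strides[lo]] := by
          rw [hone, List.take_one, List.head?_drop]
          simp [hlt2]
        simp [hseg, hseg2, chk, List.getElem?_eq_getElem hlt, List.getElem?_eq_getElem hlt2,
          PySem.List.pyGet?_natCast]
      · rw [if_neg hone]
        have hmid1 : (lo + hi) / 2 ≤ hi := by omega
        have hmid2 : lo ≤ (lo + hi) / 2 := by omega
        have hrEq := ih ((lo + hi) / 2) hi base (by omega) hmid1 h1 h2
        have hlEq := ih lo ((lo + hi) / 2)
          (base * (isCompactRecB shape strides fuel ((lo + hi) / 2) hi base).2)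
          (by omega) hmid2 (le_trans hmid1 h1) (le_trans hmid1 h2)
        have hsplit : ∀ (L : List Int), hi ≤ L.length →
            (L.drop lo).take (hi - lo)
              = (L.drop lo).take ((lo + hi) / 2 - lo)
                  ++ (L.drop ((lo + hi) / 2)).take (hi - (lo + hi) / 2) := by
          intro L hL
          have hsum : hi - lo = ((lo + hi) / 2 - lo) + (hi - (lo + hi) / 2) := by omega
          rw [hsum, List.take_add]
          congr 1
          rw [List.drop_drop, Nat.add_sub_cancel' hmid2]
        have hlen : ((shape.drop lo).take ((lo + hi) / 2 - lo)).length
            = ((strides.drop lo).take ((lo + hi) / 2 - lo)).length := by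
          simp only [List.length_take, List.length_drop]; omega
        have hr2 : (isCompactRecB shape strides fuel ((lo + hi) / 2) hi base).2
            = (List.take (hi - (lo + hi) / 2) (List.drop ((lo + hi) / 2) shape)).prod := by
          rw [hrEq]
        rw [hr2] at hlEq
        rw [hsplit shape h1, hsplit strides h2, chk_append _ _ _ _ base hlen, List.prod_append]
        simp only [hlEq, hrEq]

-- ===== VERDICT (by name: the statement is the Claim_ definition above) =====
theorem is_compact_tensor_spec : Claim_equal_is_compact_tensor := by
  intro shape strides _ hpre
  unfold Spec_is_compact_tensor is_compact_tensor is_compact_tensor_alt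
  rw [recB_eq_chk shape strides shape.length 0 shape.length 1 le_rfl (Nat.zero_le _) le_rfl (le_of_eq hpre)]
  simp only [List.drop_zero, Nat.sub_zero, List.take_length]
  rw [goA_eq_chk shape strides hpre]
  have : strides.take shape.length = strides := by
    rw [hpre, List.take_length]
  rw [this]
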